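-- pv_equiv track=rewrite | github.com/JangAyeon/Algorithm | 22-study/백준/20924.py | isGigaIsRoot
-- ===== SOURCE A (Python) =====
-- def isGigaIsRoot(tree, root):
--     nodes = []
--     for i in range(len(tree)):
--         nodes+=list(tree[i].keys())
--
--     if root not in nodes:
--         return True
--     else:
--         return False
-- ===== SOURCE B (Python) =====
-- def isGigaIsRoot(tree, root):
--     # recursive decomposition: empty tree -> True; otherwise check the head
--     # dict and recurse on the rest (early return on the first hit)
--     if not tree:
--         return True
--     if root in tree[0]:
--         return False
--     return isGigaIsRoot(tree[1:], root)
-- ===== Notes on version B (the rewrite author's own statement) =====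
-- stated objective: alternative
-- what changed: A iteratively concatenates every dict's key list into one flat accumulator and then does a single membership test; B is a recursive function on the tree structure (empty -> True, else test the head dict and recurse on the tail) with early return and no intermediate key list.
import Mathlib
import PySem

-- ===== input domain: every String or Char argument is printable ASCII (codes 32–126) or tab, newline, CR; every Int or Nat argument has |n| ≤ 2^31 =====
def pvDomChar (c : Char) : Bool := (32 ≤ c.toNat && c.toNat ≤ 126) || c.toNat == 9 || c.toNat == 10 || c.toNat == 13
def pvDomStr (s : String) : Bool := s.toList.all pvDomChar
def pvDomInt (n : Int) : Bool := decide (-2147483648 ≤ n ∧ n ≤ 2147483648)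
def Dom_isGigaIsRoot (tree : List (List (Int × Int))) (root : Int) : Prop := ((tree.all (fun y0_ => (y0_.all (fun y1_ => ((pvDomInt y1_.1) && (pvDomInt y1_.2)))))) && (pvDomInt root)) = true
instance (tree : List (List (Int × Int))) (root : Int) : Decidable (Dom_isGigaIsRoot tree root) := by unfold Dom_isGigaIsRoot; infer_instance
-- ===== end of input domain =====

-- B replaces A's accumulate-all-keys-then-test loop by a recursive early-return
-- scan of the tree structure (alternative decomposition; same cost, no key list).

-- ===== PORT A =====
def isGigaIsRoot (tree : List (List (Int × Int))) (root : Int) : Bool :=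
  let nodes := tree.foldl (fun acc d => acc ++ d.map Prod.fst) []
  if root ∈ nodes then false else true

-- ===== PORT B =====
def isGigaIsRoot_alt (tree : List (List (Int × Int))) (root : Int) : Bool :=
  match tree with
  | [] => true
  | d :: rest =>
    if root ∈ d.map Prod.fst then false
    else isGigaIsRoot_alt rest root

-- ===== PRECONDITION & SPEC =====
def Spec_isGigaIsRoot (tree : List (List (Int × Int))) (root : Int) (out : Bool) : Prop := out = isGigaIsRoot_alt tree root
instance (tree : List (List (Int × Int))) (root : Int) (out : Bool) : Decidable (Spec_isGigaIsRoot tree root out) := by unfold Spec_isGigaIsRoot; infer_instance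

-- ===== CLAIM (what is proved, stated in full; the proofs are below) =====
def Claim_equal_isGigaIsRoot : Prop := ∀ (tree : List (List (Int × Int))) (root : Int), Dom_isGigaIsRoot tree root → Spec_isGigaIsRoot tree root (isGigaIsRoot tree root)

-- ===== LEMMAS AND PROOFS =====
theorem mem_foldl_append (tree : List (List (Int × Int))) (root : Int) (acc : List Int) :
    (root ∈ tree.foldl (fun acc d => acc ++ d.map Prod.fst) acc) ↔
      (root ∈ acc ∨ ∃ d ∈ tree, root ∈ d.map Prod.fst) := by
  induction tree generalizing acc with
  | nil => simp [List.foldl]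
  | cons h t ih =>
    rw [List.foldl_cons, ih]
    simp only [List.mem_append, List.mem_cons]
    constructor
    · rintro ((ha | hh) | ⟨d, hd, hr⟩)
      · exact Or.inl ha
      · exact Or.inr ⟨h, Or.inl rfl, hh⟩
      · exact Or.inr ⟨d, Or.inr hd, hr⟩
    · rintro (ha | ⟨d, rfl | hd, hr⟩)
      · exact Or.inl (Or.inl ha)
      · exact Or.inl (Or.inr hr)
      · exact Or.inr ⟨d, hd, hr⟩

theorem alt_eq_not_exists (tree : List (List (Int × Int))) (root : Int) :
    isGigaIsRoot_alt tree root = !(decide (∃ d ∈ tree, root ∈ d.map Prod.fst)) := by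
  induction tree with
  | nil => simp [isGigaIsRoot_alt]
  | cons d t ih =>
    by_cases hm : root ∈ d.map Prod.fst
    · have hx : ∃ x ∈ d :: t, root ∈ x.map Prod.fst := ⟨d, List.mem_cons_self, hm⟩
      simp only [isGigaIsRoot_alt, if_pos hm, decide_eq_true hx, Bool.not_true]
    · simp only [isGigaIsRoot_alt, if_neg hm, ih]
      apply congrArg
      rw [decide_eq_decide]
      constructor
      · rintro ⟨x, hx, hr⟩
        exact ⟨x, List.mem_cons_of_mem _ hx, hr⟩
      · rintro ⟨x, hx, hr⟩
        rcases List.mem_cons.1 hx with rfl | hx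
        · exact absurd hr hm
        · exact ⟨x, hx, hr⟩

-- ===== VERDICT (by name: the statement is the Claim_ definition above) =====
theorem isGigaIsRoot_spec : Claim_equal_isGigaIsRoot := by
  intro tree root _
  unfold Spec_isGigaIsRoot isGigaIsRoot
  rw [alt_eq_not_exists]
  by_cases h : ∃ d ∈ tree, root ∈ d.map Prod.fst
  · rw [if_pos (by rw [mem_foldl_append]; exact Or.inr h)]
    simp only [decide_eq_true h, Bool.not_true]
  · rw [if_neg (by rw [mem_foldl_append]; simp only [List.not_mem_nil, false_or]; exact h)]
    simp only [decide_eq_false h, Bool.not_false]
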